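-- pv_equiv track=rewrite | github.com/jmgoff/FitSNAP-1 | fitsnap3lib/scrapers/vasp_scraper.py | parse_outcar_header
-- ===== SOURCE A (Python) =====
-- def parse_outcar_header(header):
--     ## These searches replace the POSCAR and POTCAR, and can also check IBRION for AIMD runs (commented out now)
--     lines_potcar, lines_vrhfin, lines_ions_per_type = [], [],[]
--     potcar_list, potcar_elements, ions_per_type = [], [], []
--     # line_ibrion, is_aimd = "", False
--
--     for line in header:
--         if "VRHFIN" in line:
--             lines_vrhfin.append(line)
--         elif "ions per type" in line:
--             lines_ions_per_type.append(line)
--         elif "POTCAR" in line: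
--             lines_potcar.append(line)
--             # Look for the ordering of the atom types - grabbing POTCAR filenames first, then atom labels separately because VASP has terribly inconsistent formatting
--             if line.split()[1:] not in potcar_list:  # VASP will have these lines in the OUTCAR twice, and we don't need to append them the second time
--                 potcar_list.append(line.split()[1:])  # each line will look something like ['PAW_PBE', 'Zr_sv_GW', '05Dec2013']
--
--     ## TODO add check that warns user if POSCAR elements and POTCAR order are not the same (if possible)
--
--     for line in lines_vrhfin:
--         str0 = line.strip().replace("VRHFIN =", "")
--         str1 = str0[:str0.find(":")]
--         potcar_elements.append(str1)
--
--     for line in lines_ions_per_type: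
--         str0 = line.replace("ions per type = ","").strip()
--         ions_per_type = [int(s) for s in str0.split()]
--
--     return potcar_list, potcar_elements, ions_per_type
-- ===== SOURCE B (Python) =====
-- def parse_outcar_header(header):
--     # Single pass: extract each datum inline instead of buffering matched lines.
--     potcar_list, potcar_elements, ions_per_type = [], [], []
--     for line in header:
--         if "VRHFIN" in line:
--             str0 = line.strip().replace("VRHFIN =", "")
--             potcar_elements.append(str0[:str0.find(":")])
--         elif "ions per type" in line:
--             ions_per_type = [int(s) for s in line.replace("ions per type = ", "").strip().split()]
--         elif "POTCAR" in line:
--             toks = line.split()[1:]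
--             if toks not in potcar_list:
--                 potcar_list.append(toks)
--     return potcar_list, potcar_elements, ions_per_type
-- ===== Notes on version B (the rewrite author's own statement) =====
-- stated objective: simpler
-- what changed: Replaced A's buffer-then-postprocess design (three intermediate line lists, then two extra loops) with one fused pass that extracts each datum inline, keeping the elif priority and the last-ions-line-wins / POTCAR-dedup semantics.
import Mathlib
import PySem

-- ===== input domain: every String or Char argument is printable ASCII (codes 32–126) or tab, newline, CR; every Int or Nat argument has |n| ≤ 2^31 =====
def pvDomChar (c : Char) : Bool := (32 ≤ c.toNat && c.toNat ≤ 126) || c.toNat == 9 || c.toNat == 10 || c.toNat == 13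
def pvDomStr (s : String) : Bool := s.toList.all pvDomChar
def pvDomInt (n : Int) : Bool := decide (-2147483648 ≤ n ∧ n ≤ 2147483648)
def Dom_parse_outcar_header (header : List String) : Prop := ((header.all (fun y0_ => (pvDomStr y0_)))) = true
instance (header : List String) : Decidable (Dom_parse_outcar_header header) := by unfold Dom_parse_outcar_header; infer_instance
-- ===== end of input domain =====

-- B fuses A's buffer-then-postprocess passes into one inline-extracting loop (simpler decomposition, same results).


-- ===== PORT A =====
-- A's state: (lines_potcar, lines_vrhfin, lines_ions_per_type, potcar_list), then two post-loops.
def pvStepA (st : List String × List String × List String × List (List String)) (line : String) :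
    List String × List String × List String × List (List String) :=
  let (lp, lv, li, pl) := st
  if PySem.Str.isIn "VRHFIN" line then (lp, lv ++ [line], li, pl)
  else if PySem.Str.isIn "ions per type" line then (lp, lv, li ++ [line], pl)
  else if PySem.Str.isIn "POTCAR" line then
    let toks := PySem.List.slice (PySem.Str.split₀ line) (some 1) none  -- line.split()[1:]
    (lp ++ [line], lv, li, if pl.contains toks then pl else pl ++ [toks])
  else (lp, lv, li, pl)

-- str0 = line.strip().replace("VRHFIN =", ""); str1 = str0[:str0.find(":")]
def pvVrhA (line : String) : String :=
  let str0 := PySem.Str.replace (PySem.Str.strip line) "VRHFIN =" ""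
  PySem.Str.slice str0 none (some (PySem.Str.find str0 ":"))

-- [int(s) for s in line.replace("ions per type = ","").strip().split()]; total form under Pre_
def pvIonsA (line : String) : List Int :=
  let str0 := PySem.Str.strip (PySem.Str.replace line "ions per type = " "")
  (PySem.Str.split₀ str0).map (fun s => (PySem.Int.ofStr? s).getD 0)

def parse_outcar_header (header : List String) : List (List String) × List String × List Int :=
  let st := header.foldl pvStepA (([], [], [], []) :
    List String × List String × List String × List (List String))
  let potcar_elements := st.2.1.foldl (fun acc line => acc ++ [pvVrhA line]) []
  let ions_per_type := st.2.2.1.foldl (fun _ line => pvIonsA line) ([] : List Int)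
  (st.2.2.2, potcar_elements, ions_per_type)

-- ===== PORT B =====
-- B's state is the three results themselves; each matched line is decoded on the spot.
def pvStepB (st : List (List String) × List String × List Int) (line : String) :
    List (List String) × List String × List Int :=
  let (pl, pe, ions) := st
  if PySem.Str.isIn "VRHFIN" line then
    let str0 := PySem.Str.replace (PySem.Str.strip line) "VRHFIN =" ""
    (pl, pe ++ [PySem.Str.slice str0 none (some (PySem.Str.find str0 ":"))], ions)
  else if PySem.Str.isIn "ions per type" line then
    (pl, pe,
      (PySem.Str.split₀ (PySem.Str.strip (PySem.Str.replace line "ions per type = " ""))).map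
        (fun s => (PySem.Int.ofStr? s).getD 0))
  else if PySem.Str.isIn "POTCAR" line then
    let toks := PySem.List.slice (PySem.Str.split₀ line) (some 1) none
    ((if pl.contains toks then pl else pl ++ [toks]), pe, ions)
  else st

def parse_outcar_header_alt (header : List String) : List (List String) × List String × List Int :=
  header.foldl pvStepB ([], [], [])

-- ===== PRECONDITION & SPEC =====
-- Pre_ excludes exactly the inputs where A raises ValueError: an "ions per type" line (not a
-- VRHFIN line) whose payload contains a token int() cannot parse.
def Pre_parse_outcar_header (header : List String) : Prop :=
  ∀ line ∈ header, PySem.Str.isIn "VRHFIN" line = false →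
    PySem.Str.isIn "ions per type" line = true →
    ∀ s ∈ PySem.Str.split₀ (PySem.Str.strip (PySem.Str.replace line "ions per type = " "")),
      (PySem.Int.ofStr? s).isSome = true
instance (header : List String) : Decidable (Pre_parse_outcar_header header) := by
  unfold Pre_parse_outcar_header; infer_instance

def pvWitness_parse_outcar_header : List String :=
  ["   ions per type =   2 1", "POTCAR:  PAW_PBE Zr_sv_GW 05Dec2013", "  VRHFIN =Zr: d"]

def Spec_parse_outcar_header (header : List String) (out : List (List String) × List String × List Int) : Prop := out = parse_outcar_header_alt header
instance (header : List String) (out : List (List String) × List String × List Int) : Decidable (Spec_parse_outcar_header header out) := by unfold Spec_parse_outcar_header; infer_instance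

-- ===== CLAIM (what is proved, stated in full; the proofs are below) =====
def Claim_equal_parse_outcar_header : Prop := ∀ (header : List String), Dom_parse_outcar_header header → Pre_parse_outcar_header header → Spec_parse_outcar_header header (parse_outcar_header header)

-- ===== LEMMAS AND PROOFS =====

-- the invariant: A's post-processing of its buffered state equals B's fold, for any start state
lemma pv_inv (header : List String) (lp lv li : List String) (pl : List (List String)) :
    (let st := header.foldl pvStepA (lp, lv, li, pl)
     (st.2.2.2, st.2.1.foldl (fun acc line => acc ++ [pvVrhA line]) [],
      st.2.2.1.foldl (fun _ line => pvIonsA line) ([] : List Int)))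
    = header.foldl pvStepB
        (pl, lv.foldl (fun acc line => acc ++ [pvVrhA line]) [],
         li.foldl (fun _ line => pvIonsA line) ([] : List Int)) := by
  induction header generalizing lp lv li pl with
  | nil => rfl
  | cons line rest ih =>
      simp only [List.foldl_cons, pvStepA, pvStepB]
      split_ifs <;> rw [ih] <;>
        simp [List.foldl_append, pvVrhA, pvIonsA]

-- ===== VERDICT (by name: the statement is the Claim_ definition above) =====
theorem parse_outcar_header_spec : Claim_equal_parse_outcar_header := by
  intro header _ _
  unfold Spec_parse_outcar_header parse_outcar_header parse_outcar_header_alt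
  simpa using pv_inv header [] [] [] []
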